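-- pv_equiv track=rewrite | github.com/Randoom97/AOC | 2023/day5/day5.py | transform
-- ===== SOURCE A (Python) =====
-- def transform(inputRanges: list, mappings):
--     newRanges = []
--     while inputRanges:
--         inputRange = inputRanges.pop()
--         overlapFound = False
--         for mapping in mappings:
--             length = mapping[2]
--             destStart = mapping[0]
--
--             sourceStart = mapping[1]
--             sourceEnd = sourceStart+length-1
--             inputStart = inputRange[0]
--             inputEnd = inputStart + inputRange[1]-1
--
--             # fully contained
--             if inputStart >= sourceStart and inputEnd <= sourceEnd:
--                 newRanges.append((destStart +inputStart-sourceStart, inputRange[1]))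
--                 overlapFound = True
--                 break
--             # fully eclipsing two new input ranges and one transformed one
--             if sourceStart > inputStart and sourceEnd < inputEnd:
--                 newRanges.append((destStart, length))
--                 inputRanges.append((inputStart, sourceStart-inputStart))
--                 inputRanges.append((sourceEnd+1, inputEnd-sourceEnd))
--                 overlapFound = True
--                 break
--             # left overlap: convert left half retry right half
--             if sourceStart <= inputStart <= sourceEnd:
--                 newRanges.append((destStart+inputStart-sourceStart, sourceEnd-inputStart+1))
--                 inputRanges.append((sourceEnd+1, inputEnd-sourceEnd))
--                 overlapFound = True
--                 break
--             # right overlap: convert right half retry left half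
--             if sourceStart <= inputEnd <= sourceEnd:
--                 newRanges.append((destStart, inputEnd-sourceStart+1))
--                 inputRanges.append((inputStart, sourceStart-inputStart))
--                 overlapFound = True
--                 break
--         if not overlapFound:
--             newRanges.append(inputRange)
--     return newRanges
-- ===== SOURCE B (Python) =====
-- # B: recursive per-range splitter (depth-first recursion instead of A's explicit
-- # while/stack loop); same return value and, like A, empties inputRanges in place.
-- def transform(inputRanges: list, mappings):
--     newRanges = []
--
--     def process(rng):
--         start, length = rng
--         end = start + length - 1
--         for destStart, sourceStart, mlen in mappings:
--             sourceEnd = sourceStart + mlen - 1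
--             if start >= sourceStart and end <= sourceEnd:
--                 newRanges.append((destStart + start - sourceStart, length))
--                 return
--             if sourceStart > start and sourceEnd < end:
--                 newRanges.append((destStart, mlen))
--                 process((sourceEnd + 1, end - sourceEnd))
--                 process((start, sourceStart - start))
--                 return
--             if sourceStart <= start <= sourceEnd:
--                 newRanges.append((destStart + start - sourceStart, sourceEnd - start + 1))
--                 process((sourceEnd + 1, end - sourceEnd))
--                 return
--             if sourceStart <= end <= sourceEnd:
--                 newRanges.append((destStart, end - sourceStart + 1))
--                 process((start, sourceStart - start))
--                 return
--         newRanges.append(rng)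
--
--     while inputRanges:
--         process(inputRanges.pop())
--     return newRanges
-- ===== Notes on version B (the rewrite author's own statement) =====
-- stated objective: alternative
-- what changed: Replaces A's flat while-loop over a mutable work stack with a depth-first recursive helper process(rng) that splits one range against the mappings and recurses on the leftover pieces (right piece before left in the eclipsing case), driven by popping the input list.
import Mathlib
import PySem

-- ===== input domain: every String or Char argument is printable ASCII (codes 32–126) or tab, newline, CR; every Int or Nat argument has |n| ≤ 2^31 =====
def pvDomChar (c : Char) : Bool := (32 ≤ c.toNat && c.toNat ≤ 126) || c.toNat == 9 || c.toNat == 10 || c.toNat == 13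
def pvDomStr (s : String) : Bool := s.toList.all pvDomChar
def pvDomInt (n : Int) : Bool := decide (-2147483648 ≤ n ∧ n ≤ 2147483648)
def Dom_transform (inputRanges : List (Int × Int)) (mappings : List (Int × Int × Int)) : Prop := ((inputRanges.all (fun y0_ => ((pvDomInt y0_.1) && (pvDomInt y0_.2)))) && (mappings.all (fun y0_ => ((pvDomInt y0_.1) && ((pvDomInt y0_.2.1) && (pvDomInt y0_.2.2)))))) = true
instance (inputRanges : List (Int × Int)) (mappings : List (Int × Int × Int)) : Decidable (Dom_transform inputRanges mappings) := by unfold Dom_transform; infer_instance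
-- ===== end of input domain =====

-- B replaces A's explicit while/stack loop by a depth-first recursive per-range helper
-- (alternative decomposition, same cost); equivalence is about the RETURN value — both
-- Pythons also empty inputRanges in place.  The Nat fuel in both ports is only a
-- totality guard (see the comment at pvFuel); the equivalence holds for every fuel.

-- ===== PORT A =====
-- The four branches of A's inner `for mapping in mappings` loop, in A's order.
inductive PvAct
  | contained (x : Int × Int)
  | eclipse (mid left right : Int × Int)
  | leftOv (x right : Int × Int)
  | rightOv (x left : Int × Int)
deriving Repr, DecidableEq

-- A's inner for-loop: first branch of the first mapping that fires (none = no overlap).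
def pvScanA : List (Int × Int × Int) → (Int × Int) → Option PvAct
  | [], _ => none
  | m :: ms, rng =>
    if m.2.1 ≤ rng.1 ∧ rng.1 + rng.2 ≤ m.2.1 + m.2.2 then
      some (.contained (m.1 + rng.1 - m.2.1, rng.2))
    else if rng.1 < m.2.1 ∧ m.2.1 + m.2.2 < rng.1 + rng.2 then
      some (.eclipse (m.1, m.2.2) (rng.1, m.2.1 - rng.1) (m.2.1 + m.2.2, rng.1 + rng.2 - (m.2.1 + m.2.2)))
    else if m.2.1 ≤ rng.1 ∧ rng.1 < m.2.1 + m.2.2 then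
      some (.leftOv (m.1 + rng.1 - m.2.1, m.2.1 + m.2.2 - rng.1) (m.2.1 + m.2.2, rng.1 + rng.2 - (m.2.1 + m.2.2)))
    else if m.2.1 < rng.1 + rng.2 ∧ rng.1 + rng.2 ≤ m.2.1 + m.2.2 then
      some (.rightOv (m.1, rng.1 + rng.2 - m.2.1) (rng.1, m.2.1 - rng.1))
    else pvScanA ms rng

-- A's `while inputRanges:` loop; the stack is kept top-first (Python's list end = head here),
-- so `pop` is head and `append l; append r` makes the stack `r :: l :: rest`.
def pvLoopA (mappings : List (Int × Int × Int)) : Nat → List (Int × Int) → List (Int × Int) → List (Int × Int)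
  | 0, _, acc => acc
  | _ + 1, [], acc => acc
  | fuel + 1, rng :: rest, acc =>
    match pvScanA mappings rng with
    | none => pvLoopA mappings fuel rest (acc ++ [rng])
    | some (.contained x) => pvLoopA mappings fuel rest (acc ++ [x])
    | some (.eclipse mid l r) => pvLoopA mappings fuel (r :: l :: rest) (acc ++ [mid])
    | some (.leftOv x r) => pvLoopA mappings fuel (r :: rest) (acc ++ [x])
    | some (.rightOv x l) => pvLoopA mappings fuel (l :: rest) (acc ++ [x])

-- Fuel (a totality guard only; both ports thread the same counter, and the
-- equivalence below holds for EVERY fuel value).  In a terminating Python run every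
-- range endpoint comes from the finitely many input/mapping endpoints, and a repeated
-- range along a processing chain would loop forever, so the number of loop iterations
-- of a terminating run is below this bound.
def pvFuel (inputRanges : List (Int × Int)) (mappings : List (Int × Int × Int)) : Nat :=
  2 ^ ((inputRanges.length + mappings.length + 1) ^ 2 + inputRanges.length + 2)

def transform (inputRanges : List (Int × Int)) (mappings : List (Int × Int × Int)) : List (Int × Int) :=
  pvLoopA mappings (pvFuel inputRanges mappings) inputRanges.reverse []

-- ===== PORT B =====
-- B's recursive `process(rng)`: scans the mappings (same four branches, inlined) and
-- recurses on the leftover pieces, appending to the accumulator.  The shared fuel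
-- counter is threaded through and returned (`min p.2 fuel` only justifies termination;
-- pvProcessB_resid below shows it equals p.2).
def pvProcessB : Nat → List (Int × Int × Int) → List (Int × Int × Int) → (Int × Int) → List (Int × Int) → (List (Int × Int)) × Nat
  | 0, _, _, _, acc => (acc, 0)
  | fuel + 1, _, [], rng, acc => (acc ++ [rng], fuel)
  | fuel + 1, all, m :: ms, rng, acc =>
    if m.2.1 ≤ rng.1 ∧ rng.1 + rng.2 ≤ m.2.1 + m.2.2 then
      (acc ++ [(m.1 + rng.1 - m.2.1, rng.2)], fuel)
    else if rng.1 < m.2.1 ∧ m.2.1 + m.2.2 < rng.1 + rng.2 then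
      pvProcessB (min (pvProcessB fuel all all (m.2.1 + m.2.2, rng.1 + rng.2 - (m.2.1 + m.2.2)) (acc ++ [(m.1, m.2.2)])).2 fuel) all all (rng.1, m.2.1 - rng.1) (pvProcessB fuel all all (m.2.1 + m.2.2, rng.1 + rng.2 - (m.2.1 + m.2.2)) (acc ++ [(m.1, m.2.2)])).1
    else if m.2.1 ≤ rng.1 ∧ rng.1 < m.2.1 + m.2.2 then
      pvProcessB fuel all all (m.2.1 + m.2.2, rng.1 + rng.2 - (m.2.1 + m.2.2)) (acc ++ [(m.1 + rng.1 - m.2.1, m.2.1 + m.2.2 - rng.1)])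
    else if m.2.1 < rng.1 + rng.2 ∧ rng.1 + rng.2 ≤ m.2.1 + m.2.2 then
      pvProcessB fuel all all (rng.1, m.2.1 - rng.1) (acc ++ [(m.1, rng.1 + rng.2 - m.2.1)])
    else pvProcessB (fuel + 1) all ms rng acc
  termination_by fuel _ ms _ _ => (fuel, ms.length)
  decreasing_by
    · exact Prod.Lex.left _ _ (Nat.lt_succ_self fuel)
    · exact Prod.Lex.left _ _ (Nat.lt_succ_of_le (Nat.min_le_right _ _))
    · exact Prod.Lex.left _ _ (Nat.lt_succ_self fuel)
    · exact Prod.Lex.left _ _ (Nat.lt_succ_self fuel)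
    · exact Prod.Lex.right _ (Nat.lt_succ_self ms.length)

-- B's driver: `while inputRanges: process(inputRanges.pop())` (stack top-first, as in A's port).
def pvGoB (mappings : List (Int × Int × Int)) : Nat → List (Int × Int) → List (Int × Int) → List (Int × Int)
  | _, [], acc => acc
  | fuel, r :: rest, acc =>
    let p := pvProcessB fuel mappings mappings r acc
    pvGoB mappings p.2 rest p.1

def transform_alt (inputRanges : List (Int × Int)) (mappings : List (Int × Int × Int)) : List (Int × Int) :=
  pvGoB mappings (pvFuel inputRanges mappings) inputRanges.reverse []

-- ===== PRECONDITION & SPEC =====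
-- No Pre_: the claim is unconditional (both ports agree for every input and fuel).
def Spec_transform (inputRanges : List (Int × Int)) (mappings : List (Int × Int × Int)) (out : List (Int × Int)) : Prop := out = transform_alt inputRanges mappings
instance (inputRanges : List (Int × Int)) (mappings : List (Int × Int × Int)) (out : List (Int × Int)) : Decidable (Spec_transform inputRanges mappings out) := by unfold Spec_transform; infer_instance

-- ===== CLAIM (what is proved, stated in full; the proofs are below) =====
def Claim_equal_transform : Prop := ∀ (inputRanges : List (Int × Int)) (mappings : List (Int × Int × Int)), Dom_transform inputRanges mappings → Spec_transform inputRanges mappings (transform inputRanges mappings)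

-- ===== LEMMAS AND PROOFS =====

-- The returned fuel never exceeds the fuel supplied.
theorem pvProcessB_resid (fuel : Nat) (all ms : List (Int × Int × Int)) (rng : Int × Int) (acc : List (Int × Int)) :
    (pvProcessB fuel all ms rng acc).2 ≤ fuel := by
  induction fuel, all, ms, rng, acc using pvProcessB.induct
  all_goals rw [pvProcessB]
  all_goals first
    | (simp only []; omega)
    | (split_ifs <;> (try simp_all) <;> omega)

-- B's scan, expressed through A's scan result.
theorem pvProcessB_scan (fuel : Nat) (all : List (Int × Int × Int)) :
    ∀ (ms : List (Int × Int × Int)) (rng : Int × Int) (acc : List (Int × Int)),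
    pvProcessB (fuel + 1) all ms rng acc =
      match pvScanA ms rng with
      | none => (acc ++ [rng], fuel)
      | some (.contained x) => (acc ++ [x], fuel)
      | some (.eclipse mid l r) =>
          pvProcessB (pvProcessB fuel all all r (acc ++ [mid])).2 all all l (pvProcessB fuel all all r (acc ++ [mid])).1
      | some (.leftOv x r) => pvProcessB fuel all all r (acc ++ [x])
      | some (.rightOv x l) => pvProcessB fuel all all l (acc ++ [x])
  | [], rng, acc => by rw [pvProcessB, pvScanA]
  | m :: ms, rng, acc => by
    rw [pvProcessB, pvScanA]
    split_ifs with h1 h2 h3 h4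
    · rfl
    · rw [Nat.min_eq_left (pvProcessB_resid ..)]
    · rfl
    · rfl
    · exact pvProcessB_scan fuel all ms rng acc

-- One popped range in A's loop = one call of B's process, with the fuel threaded.
theorem pvLoop_process (all : List (Int × Int × Int)) :
    ∀ (fuel : Nat) (rng : Int × Int) (rest acc : List (Int × Int)),
    pvLoopA all fuel (rng :: rest) acc =
      pvLoopA all (pvProcessB fuel all all rng acc).2 rest (pvProcessB fuel all all rng acc).1 := by
  intro fuel
  induction fuel using Nat.strong_induction_on with
  | _ fuel ih =>
    intro rng rest acc
    match fuel with
    | 0 =>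
      cases rest <;> simp [pvLoopA, pvProcessB]
    | fuel + 1 =>
      rw [pvProcessB_scan, pvLoopA]
      cases hs : pvScanA all rng with
      | none => rfl
      | some act =>
        cases act with
        | contained x => rfl
        | eclipse mid l r =>
          show pvLoopA all fuel (r :: l :: rest) (acc ++ [mid]) = _
          rw [ih fuel (Nat.lt_succ_self _) r (l :: rest) (acc ++ [mid])]
          exact ih _ (Nat.lt_succ_of_le (pvProcessB_resid ..)) l rest _
        | leftOv x r => exact ih fuel (Nat.lt_succ_self _) r rest (acc ++ [x])
        | rightOv x l => exact ih fuel (Nat.lt_succ_self _) l rest (acc ++ [x])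

theorem pvLoop_go (all : List (Int × Int × Int)) :
    ∀ (stack : List (Int × Int)) (fuel : Nat) (acc : List (Int × Int)),
    pvLoopA all fuel stack acc = pvGoB all fuel stack acc := by
  intro stack
  induction stack with
  | nil => intro fuel acc; cases fuel <;> simp [pvLoopA, pvGoB]
  | cons r rest ih =>
    intro fuel acc
    rw [pvLoop_process, pvGoB]
    exact ih _ _

-- ===== VERDICT (by name: the statement is the Claim_ definition above) =====
theorem transform_spec : Claim_equal_transform := by
  intro inputRanges mappings _
  unfold Spec_transform transform transform_alt
  exact pvLoop_go mappings inputRanges.reverse (pvFuel inputRanges mappings) []
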